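-- pv_equiv track=rewrite | github.com/lancelot291/algorithms-level-4 | 2025-01-24/91_skill-dev.py | solution
-- ===== SOURCE A (Python) =====
-- def solution(progresses, speeds):
--     days_left = []
--     for i in range(len(progresses)):
--         days_left.append((100 - progresses[i] + speeds[i] - 1) // speeds[i])
--         # calculate the number of days left for each progress and append to the list
--     for i in range(1, len(days_left)):
--         if days_left[i] < days_left[i - 1]:
--             days_left[i] = days_left[i - 1]
--             # if the number of days left for the progress is less than the previous one,
--             # change the number of days left to the previous one
--             # ex) [5, 10, 1, 1, 20, 1] -> [5, 10, 10, 10, 20, 20]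
--
--         set_days_left = set(days_left)
--         # make a set of the number of days left ex) {5, 10, 20}
--
--         answer = []
--
--         for i in sorted(set_days_left):
--             answer.append(days_left.count(i))
--
--     return answer
-- ===== SOURCE B (Python) =====
-- def solution(progresses, speeds):
--     # One pass: propagate the running maximum of the days-left values and
--     # count run lengths directly (run boundaries = new maxima).
--     answer = []
--     cur = None
--     for p, s in zip(progresses, speeds):
--         d = (100 - p + s - 1) // s
--         if cur is not None and d <= cur:
--             answer[-1] += 1
--         else:
--             cur = d
--             answer.append(1)
--     return answer
-- ===== Notes on version B (the rewrite author's own statement) =====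
-- stated objective: faster
-- what changed: A recomputes days, rescans the whole list with sorted(set(...)) and list.count on every loop iteration; B makes a single pass that propagates the running maximum of the days-left values and counts run lengths in place.
import Mathlib
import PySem

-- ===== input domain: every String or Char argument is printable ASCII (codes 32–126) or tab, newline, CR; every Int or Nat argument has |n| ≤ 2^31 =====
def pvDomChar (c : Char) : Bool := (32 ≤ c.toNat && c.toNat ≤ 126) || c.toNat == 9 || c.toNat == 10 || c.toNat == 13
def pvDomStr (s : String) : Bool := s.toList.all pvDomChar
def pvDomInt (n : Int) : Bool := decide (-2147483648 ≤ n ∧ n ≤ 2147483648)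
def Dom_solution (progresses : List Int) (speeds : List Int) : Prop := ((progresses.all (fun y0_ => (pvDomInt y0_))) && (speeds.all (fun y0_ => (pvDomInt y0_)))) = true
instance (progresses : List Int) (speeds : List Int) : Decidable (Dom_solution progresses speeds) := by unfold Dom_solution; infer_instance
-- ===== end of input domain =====

-- B replaces A's per-iteration sorted(set)/count rescans by a single pass that
-- propagates the running maximum of the days-left values and counts run lengths.

-- ===== PORT A =====
-- one iteration of A's second loop: conditionally overwrite days_left[i], then
-- rebuild answer from sorted(set(days_left)) with list.count
def pvStepA (st : List Int × List Int) (i : Int) : List Int × List Int :=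
  let dl := if PySem.List.pyGetD st.1 i 0 < PySem.List.pyGetD st.1 (i - 1) 0
            then PySem.List.pySetD st.1 i (PySem.List.pyGetD st.1 (i - 1) 0)
            else st.1
  (dl, (PySem.List.sorted (PySem.Set.ofList dl) (fun x => x)).map
        (fun v => (PySem.List.count dl v : Int)))

def solution (progresses : List Int) (speeds : List Int) : List Int :=
  let days_left := (PySem.List.pyRange 0 (progresses.length : Int) 1).foldl
      (fun dl i => dl ++ [PySem.Int.floordiv
          (100 - PySem.List.pyGetD progresses i 0 + PySem.List.pyGetD speeds i 0 - 1)
          (PySem.List.pyGetD speeds i 0)]) []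
  ((PySem.List.pyRange 1 (days_left.length : Int) 1).foldl pvStepA (days_left, [])).2

-- ===== PORT B =====
-- one iteration of B's loop: d = ceil days; extend the current run or start a new one
-- (answer is kept reversed; answer[-1] += 1 is an increment of the head)
def pvStepB (st : List Int × Option Int) (ps : Int × Int) : List Int × Option Int :=
  let d := PySem.Int.floordiv (100 - ps.1 + ps.2 - 1) ps.2
  match st.2 with
  | some c =>
      if d ≤ c then
        (match st.1 with
         | [] => ([1], some c)        -- unreachable: answer is nonempty whenever cur is set
         | n :: rest => ((n + 1) :: rest, some c))
      else (1 :: st.1, some d)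
  | none => (1 :: st.1, some d)

def solution_alt (progresses : List Int) (speeds : List Int) : List Int :=
  ((progresses.zip speeds).foldl pvStepB ([], none)).1.reverse

-- ===== PRECONDITION & SPEC =====
-- Pre_ = exactly the inputs on which A returns: at least two progresses (otherwise the
-- Python name 'answer' is never assigned and A raises UnboundLocalError), speeds at
-- least as long as progresses (otherwise IndexError), and no zero speed among the used
-- ones (otherwise ZeroDivisionError).
def Pre_solution (progresses : List Int) (speeds : List Int) : Prop :=
  2 ≤ progresses.length ∧ progresses.length ≤ speeds.length ∧
    ∀ x ∈ speeds.take progresses.length, x ≠ 0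
instance (progresses : List Int) (speeds : List Int) : Decidable (Pre_solution progresses speeds) := by
  unfold Pre_solution; infer_instance

def pvWitness_solution : List Int × List Int := ([93, 30, 55], [1, 30, 5])

def Spec_solution (progresses : List Int) (speeds : List Int) (out : List Int) : Prop :=
  out = solution_alt progresses speeds
instance (progresses : List Int) (speeds : List Int) (out : List Int) : Decidable (Spec_solution progresses speeds out) := by unfold Spec_solution; infer_instance

-- ===== CLAIM (what is proved, stated in full; the proofs are below) =====
def Claim_equal_solution : Prop := ∀ (progresses : List Int) (speeds : List Int), Dom_solution progresses speeds → Pre_solution progresses speeds → Spec_solution progresses speeds (solution progresses speeds)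

-- ===== LEMMAS AND PROOFS =====

-- the ceil-division days value
def pvDays (a b : Int) : Int := PySem.Int.floordiv (100 - a + b - 1) b

-- prefix-maximum propagation of A's second loop (tail, seeded with the running max)
def pmGo (a : Int) : List Int → List Int
  | [] => []
  | y :: ys => max a y :: pmGo (max a y) ys

-- run-length encoding: current run value c, current run count n
def rleGo (c n : Int) : List Int → List Int
  | [] => [n]
  | y :: ys => if y = c then rleGo c (n + 1) ys else n :: rleGo y 1 ys

-- answer A rebuilds each iteration
def answerOf (dl : List Int) : List Int :=
  (PySem.List.sorted (PySem.Set.ofList dl) (fun x => x)).map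
    (fun v => (PySem.List.count dl v : Int))

theorem pvStepA_eq (st : List Int × List Int) (i : Int) :
    pvStepA st i =
      (if PySem.List.pyGetD st.1 i 0 < PySem.List.pyGetD st.1 (i - 1) 0
       then PySem.List.pySetD st.1 i (PySem.List.pyGetD st.1 (i - 1) 0) else st.1,
       answerOf (if PySem.List.pyGetD st.1 i 0 < PySem.List.pyGetD st.1 (i - 1) 0
       then PySem.List.pySetD st.1 i (PySem.List.pyGetD st.1 (i - 1) 0) else st.1)) := rfl

theorem getD_append_cons {α : Type} (l r : List α) (y d : α) :
    (l ++ y :: r).getD l.length d = y := by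
  induction l with
  | nil => rfl
  | cons a l ih => simpa using ih

theorem getD_append_pred {α : Type} (l r : List α) (d : α) (h : l ≠ []) :
    (l ++ r).getD (l.length - 1) d = l.getLast h := by
  induction l with
  | nil => exact absurd rfl h
  | cons a l ih =>
    cases l with
    | nil => rfl
    | cons b l' => simpa [List.getLast] using ih (by simp)

theorem set_append_cons {α : Type} (l r : List α) (y v : α) :
    (l ++ y :: r).set l.length v = l ++ v :: r := by
  induction l with
  | nil => rfl
  | cons a l ih => simpa using ih

-- A's second loop computes prefix maxima and, after its last iteration,
-- answer = answerOf (final days_left)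
theorem foldA_go (suf : List Int) : ∀ (done : List Int) (h : done ≠ []) (ans : List Int),
    (PySem.List.pyRange (done.length : Int) ((done.length : Int) + (suf.length : Int)) 1).foldl
        pvStepA (done ++ suf, ans)
      = (done ++ pmGo (done.getLast h) suf,
         if suf = [] then ans else answerOf (done ++ pmGo (done.getLast h) suf)) := by
  induction suf with
  | nil =>
    intro done h ans
    simp [PySem.List.pyRange_one_eq_nil, pmGo]
  | cons y ys ih =>
    intro done h ans
    have hcons : PySem.List.pyRange (done.length : Int) ((done.length : Int) + ((y :: ys).length : Int)) 1
        = (done.length : Int) :: PySem.List.pyRange ((done.length : Int) + 1) ((done.length : Int) + ((y :: ys).length : Int)) 1 := by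
      apply PySem.List.pyRange_one_cons; simp
    rw [hcons]
    -- evaluate the step at index done.length
    have hy : PySem.List.pyGetD (done ++ y :: ys) (done.length : Int) 0 = y := by
      simpa using getD_append_cons done ys y 0
    have hlast : PySem.List.pyGetD (done ++ y :: ys) ((done.length : Int) - 1) 0 = done.getLast h := by
      have hcast : ((done.length : Int) - 1) = ((done.length - 1 : Nat) : Int) := by
        have : 1 ≤ done.length := List.length_pos_iff.mpr h
        omega
      rw [hcast, PySem.List.pyGetD_natCast]
      exact getD_append_pred done (y :: ys) 0 h
    set m := max (done.getLast h) y with hm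
    have hstep : pvStepA (done ++ y :: ys, ans) (done.length : Int)
        = (done ++ m :: ys, answerOf (done ++ m :: ys)) := by
      rw [pvStepA_eq]
      by_cases hc : y < done.getLast h
      · have hmv : m = done.getLast h := by rw [hm]; omega
        simp only [hy, hlast, if_pos hc, PySem.List.pySetD_natCast, set_append_cons, hmv]
      · have hmv : m = y := by rw [hm]; omega
        simp only [hy, hlast, if_neg hc, hmv]
    rw [List.foldl_cons, hstep]
    have harith : (done.length : Int) + 1 = (((done ++ [m]).length : Nat) : Int) := by simp
    have harith2 : (done.length : Int) + ((y :: ys).length : Int)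
        = (((done ++ [m]).length : Nat) : Int) + (ys.length : Int) := by simp; omega
    have hlast2 : (done ++ [m]).getLast (by simp) = m := by simp
    have := ih (done ++ [m]) (by simp) (answerOf (done ++ m :: ys))
    rw [hlast2] at this
    rw [harith, harith2]
    rw [List.append_assoc] at this
    simp only [List.singleton_append] at this
    rw [this]
    have hpm : pmGo (done.getLast h) (y :: ys) = m :: pmGo m ys := by simp [pmGo, hm]
    cases ys with
    | nil => simp [pmGo, ← hm]
    | cons z zs => simp [hpm]

-- prefix maxima are sorted
theorem pmGo_pairwise : ∀ (t : List Int) (c : Int), List.Pairwise (· ≤ ·) (c :: pmGo c t) := by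
  intro t
  induction t with
  | nil => intro c; simp [pmGo]
  | cons y ys ih =>
    intro c
    have h := ih (max c y)
    simp only [pmGo]
    rw [List.pairwise_cons]
    refine ⟨?_, h⟩
    intro a ha
    rcases List.mem_cons.mp ha with rfl | ha
    · exact le_max_left _ _
    · exact le_trans (le_max_left c y) ((List.pairwise_cons.mp h).1 a ha)

theorem foldl_add_cons {c : Int} (l : List Int) (hc : c ∉ l) :
    ∀ acc : List Int, List.foldl PySem.Set.add (c :: acc) l = c :: List.foldl PySem.Set.add acc l := by
  induction l with
  | nil => intro acc; rfl
  | cons x xs ih =>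
    intro acc
    have hx : x ≠ c := by rintro rfl; exact hc (by simp)
    have hxs : c ∉ xs := fun h => hc (by simp [h])
    have hadd : PySem.Set.add (c :: acc) x = c :: PySem.Set.add acc x := by
      simp [PySem.Set.add, PySem.Set.contains, hx]
      split_ifs <;> simp
    rw [List.foldl_cons, hadd, List.foldl_cons, ih hxs]

theorem ofList_cons_not_mem {c : Int} (l : List Int) (hc : c ∉ l) :
    PySem.Set.ofList (c :: l) = c :: PySem.Set.ofList l := by
  rw [PySem.Set.ofList_eq_foldl, PySem.Set.ofList_eq_foldl]
  show List.foldl PySem.Set.add (PySem.Set.add [] c) l = _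
  have : PySem.Set.add ([] : List Int) c = [c] := rfl
  rw [this]
  exact foldl_add_cons l hc []

theorem ofList_cons_cons (c : Int) (l : List Int) :
    PySem.Set.ofList (c :: c :: l) = PySem.Set.ofList (c :: l) := by
  rw [PySem.Set.ofList_eq_foldl, PySem.Set.ofList_eq_foldl]
  show List.foldl PySem.Set.add (PySem.Set.add (PySem.Set.add [] c) c) l
      = List.foldl PySem.Set.add (PySem.Set.add [] c) l
  have h1 : PySem.Set.add ([] : List Int) c = [c] := rfl
  have h2 : PySem.Set.add [c] c = [c] := by simp [PySem.Set.add, PySem.Set.contains]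
  rw [h1, h2]

-- core counting lemma: on a sorted list, first occurrences are strictly increasing and
-- counting each of them yields the run lengths (n = copies of c already consumed)
theorem dedup_count_rle : ∀ (t : List Int) (c n : Int), List.Pairwise (· ≤ ·) (c :: t) →
    List.Pairwise (· < ·) (PySem.Set.ofList (c :: t)) ∧
    (PySem.Set.ofList (c :: t)).map
        (fun v => (if v = c then n else 0) + (List.count v (c :: t) : Int))
      = rleGo c (n + 1) t := by
  intro t
  induction t with
  | nil =>
    intro c n _
    constructor
    · simp [PySem.Set.ofList, PySem.Set.add]
    · have : PySem.Set.ofList [c] = [c] := rfl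
      simp [this, rleGo]
  | cons y ys ih =>
    intro c n hp
    have hcy : c ≤ y := (List.pairwise_cons.mp hp).1 y (by simp)
    have htail : List.Pairwise (· ≤ ·) (y :: ys) := (List.pairwise_cons.mp hp).2
    by_cases hyc : y = c
    · subst hyc
      have hp' : List.Pairwise (· ≤ ·) (y :: ys) := htail
      have h := ih y (n + 1) hp'
      rw [ofList_cons_cons]
      refine ⟨h.1, ?_⟩
      rw [rleGo, if_pos rfl]
      rw [← h.2]
      apply List.map_congr_left
      intro v hv
      by_cases hvy : v = y
      · subst hvy; simp; ring
      · simp [hvy, Ne.symm hvy]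
    · -- c < y, and c does not occur in y :: ys
      have hcylt : c < y := lt_of_le_of_ne hcy (fun h => hyc h.symm)
      have hnot : c ∉ y :: ys := by
        intro hmem
        have : y ≤ c := by
          rcases List.mem_cons.mp hmem with rfl | hmem'
          · exact le_refl _
          · exact (List.pairwise_cons.mp htail).1 c hmem'
        omega
      rw [ofList_cons_not_mem _ hnot]
      have h := ih y 0 htail
      have hge : ∀ v ∈ PySem.Set.ofList (y :: ys), y ≤ v := by
        intro v hv
        have hv' : v ∈ y :: ys := (PySem.Set.mem_ofList _ _).mp hv
        rcases List.mem_cons.mp hv' with rfl | hv''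
        · exact le_refl _
        · exact (List.pairwise_cons.mp htail).1 v hv''
      constructor
      · rw [List.pairwise_cons]
        exact ⟨fun v hv => lt_of_lt_of_le hcylt (hge v hv), h.1⟩
      · rw [rleGo, if_neg hyc, List.map_cons]
        have hcount : List.count c (c :: y :: ys) = 1 := by
          simp [List.count_eq_zero.mpr hnot]
        have hhead : (if c = c then n else 0) + (List.count c (c :: y :: ys) : Int) = n + 1 := by
          rw [if_pos rfl, hcount]; norm_num
        have htail2 : List.map (fun v => (if v = c then n else 0) + (List.count v (c :: y :: ys) : Int)) (PySem.Set.ofList (y :: ys))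
            = List.map (fun v => (if v = y then 0 else 0) + (List.count v (y :: ys) : Int)) (PySem.Set.ofList (y :: ys)) := by
          apply List.map_congr_left
          intro v hv
          have hvne : v ≠ c := by have := hge v hv; omega
          simp [hvne, Ne.symm hvne]
        rw [hhead, htail2, h.2]
        norm_num

-- B's loop (on precomputed days values) computes the run lengths of the prefix maxima
def bstep (st : List Int × Option Int) (d : Int) : List Int × Option Int :=
  match st.2 with
  | some c =>
      if d ≤ c then
        (match st.1 with
         | [] => ([1], some c)
         | n :: rest => ((n + 1) :: rest, some c))
      else (1 :: st.1, some d)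
  | none => (1 :: st.1, some d)

theorem pvStepB_eq (st : List Int × Option Int) (ps : Int × Int) :
    pvStepB st ps = bstep st (pvDays ps.1 ps.2) := rfl

theorem foldB_go : ∀ (t : List Int) (c n : Int) (ansRev : List Int),
    (t.foldl bstep (n :: ansRev, some c)).1.reverse
      = ansRev.reverse ++ rleGo c n (pmGo c t) := by
  intro t
  induction t with
  | nil => intro c n ansRev; simp [pmGo, rleGo]
  | cons d t' ih =>
    intro c n ansRev
    by_cases hdc : d ≤ c
    · have hmax : max c d = c := by omega
      have hstep : bstep (n :: ansRev, some c) d = ((n + 1) :: ansRev, some c) := by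
        simp [bstep, hdc]
      rw [List.foldl_cons, hstep, ih c (n + 1) ansRev]
      simp [pmGo, hmax, rleGo]
    · have hmax : max c d = d := by omega
      have hne : d ≠ c := by omega
      have hstep : bstep (n :: ansRev, some c) d = (1 :: n :: ansRev, some d) := by
        simp [bstep, hdc]
      rw [List.foldl_cons, hstep, ih d 1 (n :: ansRev)]
      simp [pmGo, hmax, rleGo, hne]

-- the computed days list equals the zip-map of pvDays
theorem days_eq (progresses speeds : List Int) (hle : progresses.length ≤ speeds.length) :
    (PySem.List.pyRange 0 (progresses.length : Int) 1).foldl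
        (fun dl i => dl ++ [PySem.Int.floordiv
            (100 - PySem.List.pyGetD progresses i 0 + PySem.List.pyGetD speeds i 0 - 1)
            (PySem.List.pyGetD speeds i 0)]) []
      = (progresses.zip speeds).map (fun ps => pvDays ps.1 ps.2) := by
  rw [PySem.List.foldl_append_singleton_eq_map]
  rw [PySem.List.pyRange_one]
  apply List.ext_getElem
  · simp; omega
  · intro k h1 h2
    have hk : k < progresses.length := by simp at h2; omega
    have hks : k < speeds.length := lt_of_lt_of_le hk hle
    simp [PySem.List.pyGetD_natCast, List.getD_eq_getElem?_getD, hk, hks, pvDays]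

-- ===== VERDICT (by name: the statement is the Claim_ definition above) =====
theorem solution_spec : Claim_equal_solution := by
  intro progresses speeds _ hpre
  obtain ⟨h2, hle, _⟩ := hpre
  unfold Spec_solution solution solution_alt
  rw [days_eq progresses speeds hle]
  set ds := (progresses.zip speeds).map (fun ps => pvDays ps.1 ps.2) with hds
  have hlen : ds.length = progresses.length := by simp [hds]; omega
  have hne : ds ≠ [] := by intro h; rw [h] at hlen; simp at hlen; omega
  obtain ⟨d0, rest, hcons⟩ := List.exists_cons_of_ne_nil hne
  have hrest : rest ≠ [] := by
    intro h; rw [h] at hcons; rw [hcons] at hlen; simp at hlen; omega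
  -- A side
  have hA : ((PySem.List.pyRange 1 (ds.length : Int) 1).foldl pvStepA (ds, [])).2
      = answerOf (d0 :: pmGo d0 rest) := by
    have := foldA_go rest [d0] (by simp) []
    simp only [List.length_cons, List.length_nil, List.getLast_singleton,
      List.singleton_append] at this
    rw [hcons]
    have harith : ((d0 :: rest).length : Int) = (1 : Int) + (rest.length : Int) := by
      simp; omega
    rw [harith]
    have h1 : ((1 : Nat) : Int) = (1 : Int) := by norm_num
    rw [← h1] at this ⊢
    rw [this]
    simp [hrest]
  rw [hA]
  -- B side
  have hB : ((progresses.zip speeds).foldl pvStepB ([], none)).1.reverse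
      = rleGo d0 1 (pmGo d0 rest) := by
    have hfold : (progresses.zip speeds).foldl pvStepB ([], none)
        = ds.foldl bstep ([], none) := by
      have hfun : pvStepB = fun st ps => bstep st (pvDays ps.1 ps.2) :=
        funext fun st => funext fun ps => pvStepB_eq st ps
      rw [hds, List.foldl_map, hfun]
    rw [hfold, hcons, List.foldl_cons]
    have hfirst : bstep (([] : List Int), (none : Option Int)) d0 = ([1], some d0) := rfl
    rw [hfirst]
    have := foldB_go rest d0 1 []
    simpa using this
  rw [hB]
  -- counting lemma
  have hpair := pmGo_pairwise rest d0
  have h := dedup_count_rle (pmGo d0 rest) d0 0 hpair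
  have hsorted : PySem.List.sorted (PySem.Set.ofList (d0 :: pmGo d0 rest)) (fun x => x)
      = PySem.Set.ofList (d0 :: pmGo d0 rest) :=
    PySem.List.sorted_eq_of_perm_of_pairwise_lt _ _ _ (List.Perm.refl _) h.1
  unfold answerOf
  rw [hsorted]
  have hmap : List.map (fun v => ((PySem.List.count (d0 :: pmGo d0 rest) v : Nat) : Int)) (PySem.Set.ofList (d0 :: pmGo d0 rest))
      = List.map (fun v => (if v = d0 then (0 : Int) else 0) + (List.count v (d0 :: pmGo d0 rest) : Int)) (PySem.Set.ofList (d0 :: pmGo d0 rest)) := by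
    apply List.map_congr_left
    intro v _
    simp [PySem.List.count_eq]
  rw [hmap, h.2]
  norm_num
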